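-- pv_equiv track=rewrite | github.com/jmpaz/cx-plugins | src/cx_plugins/providers/arxiv/arxiv.py | _line_without_unescaped_comments
-- ===== SOURCE A (Python) =====
-- def _line_without_unescaped_comments(line: str) -> str:
--     escaped = False
--     for idx, char in enumerate(line):
--         if char == "\\":
--             escaped = not escaped
--             continue
--         if char == "%" and not escaped:
--             return line[:idx]
--         escaped = False
--     return line
-- ===== SOURCE B (Python) =====
-- def _line_without_unescaped_comments(line: str) -> str:
--     # Stateless scan: a backslash escapes (consumes) the following character,
--     # so no escaped-flag toggle is needed.
--     i = 0
--     while i < len(line):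
--         if line[i] == '%':
--             return line[:i]
--         i += 2 if line[i] == '\\' else 1
--     return line
-- ===== Notes on version B (the rewrite author's own statement) =====
-- stated objective: simpler
-- what changed: Replaces the per-character escaped-flag toggle state machine with a stateless index scan in which a backslash consumes (skips over) the following character, cutting at the first % reached.
import Mathlib
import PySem

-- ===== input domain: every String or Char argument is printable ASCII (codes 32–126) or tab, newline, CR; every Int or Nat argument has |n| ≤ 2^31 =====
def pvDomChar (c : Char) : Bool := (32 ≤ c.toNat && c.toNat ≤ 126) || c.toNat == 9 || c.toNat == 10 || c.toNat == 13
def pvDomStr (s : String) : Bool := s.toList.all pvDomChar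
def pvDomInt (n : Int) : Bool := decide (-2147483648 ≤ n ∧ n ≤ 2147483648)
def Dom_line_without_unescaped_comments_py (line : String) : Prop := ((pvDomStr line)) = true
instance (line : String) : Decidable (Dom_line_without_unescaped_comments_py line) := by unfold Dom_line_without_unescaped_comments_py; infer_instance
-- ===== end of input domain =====

-- B replaces A's escaped-flag toggle state machine with a stateless scan where a
-- backslash consumes the following character (objective: simpler).

-- ===== PORT A =====
-- A's for-loop over enumerate(line) with the `escaped` flag; early return line[:idx].
def pvALoop (line : List Char) : List Char → Nat → Bool → List Char
  | [], _, _ => line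
  | c :: cs, idx, escaped =>
    if c = '\\' then pvALoop line cs (idx + 1) (!escaped)
    else if c = '%' ∧ escaped = false then line.take idx
    else pvALoop line cs (idx + 1) false

def line_without_unescaped_comments_py (line : String) : String :=
  String.ofList (pvALoop line.toList line.toList 0 false)

-- ===== PORT B =====
-- B's while-loop over an index i; line[i] is always in range here, so getD is exact.
def pvBLoop (line : List Char) (i : Nat) : List Char :=
  if _h : i < line.length then
    if line.getD i ' ' = '%' then line.take i
    else pvBLoop line (if line.getD i ' ' = '\\' then i + 2 else i + 1)
  else line
termination_by line.length - i
decreasing_by split <;> omega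

def line_without_unescaped_comments_py_alt (line : String) : String :=
  String.ofList (pvBLoop line.toList 0)

-- ===== PRECONDITION & SPEC =====
def Spec_line_without_unescaped_comments_py (line : String) (out : String) : Prop := out = line_without_unescaped_comments_py_alt line
instance (line : String) (out : String) : Decidable (Spec_line_without_unescaped_comments_py line out) := by unfold Spec_line_without_unescaped_comments_py; infer_instance

-- ===== CLAIM (what is proved, stated in full; the proofs are below) =====
def Claim_equal_line_without_unescaped_comments_py : Prop := ∀ (line : String), Dom_line_without_unescaped_comments_py line → Spec_line_without_unescaped_comments_py line (line_without_unescaped_comments_py line)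

-- ===== LEMMAS AND PROOFS =====

-- After an unconsumed backslash at index i, A's loop with escaped = true over the
-- rest behaves like restarting with escaped = false two positions later.
theorem pvALoop_escaped (line : List Char) (i : Nat) :
    pvALoop line (line.drop (i + 1)) (i + 1) true
      = pvALoop line (line.drop (i + 2)) (i + 2) false := by
  cases h : line.drop (i + 1) with
  | nil =>
    have h2 : line.drop (i + 2) = [] := by
      have : line.drop (i + 2) = List.drop 1 (line.drop (i + 1)) := by
        rw [List.drop_drop]
      rw [this, h]; rfl
    rw [h2]; rfl
  | cons d ds =>
    have h2 : line.drop (i + 2) = ds := by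
      have : line.drop (i + 2) = List.drop 1 (line.drop (i + 1)) := by
        rw [List.drop_drop]
      rw [this, h]; rfl
    rw [h2]
    by_cases hb : d = '\\'
    · simp [pvALoop, hb]
    · by_cases hp : d = '%'
      · simp [pvALoop, hp]
      · simp [pvALoop, hb, hp]

-- The two loops agree from any index i, starting with escaped = false.
theorem pvLoop_agree_aux (line : List Char) :
    ∀ n i, line.length - i ≤ n → pvALoop line (line.drop i) i false = pvBLoop line i := by
  intro n
  induction n with
  | zero =>
    intro i h
    have hge : line.length ≤ i := by omega
    rw [List.drop_eq_nil_of_le hge, pvBLoop]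
    simp [pvALoop, Nat.not_lt.mpr hge]
  | succ n ih =>
    intro i h
    by_cases hi : i < line.length
    · cases hd : line.drop i with
      | nil =>
        exact absurd (by simpa using congrArg List.length hd) (by omega)
      | cons c cs =>
        have hcs : cs = line.drop (i + 1) := by
          have : line.drop (i + 1) = List.drop 1 (line.drop i) := by
            rw [List.drop_drop]
          rw [this, hd]; rfl
        have hgd : line.getD i ' ' = c := by
          have h0 : getElem? (List.drop i line) 0 = getElem? line (i + 0) := List.getElem?_drop
          rw [hd] at h0
          have hq : getElem? line i = some c := by simpa using h0.symm
          rw [List.getD_eq_getElem?_getD, hq]; rfl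
        rw [pvBLoop]
        simp only [dif_pos hi, hgd]
        by_cases hb : c = '\\'
        · have hp : ¬ c = '%' := by rw [hb]; decide
          rw [if_neg hp, if_pos hb]
          have hA : pvALoop line (c :: cs) i false = pvALoop line cs (i + 1) true := by
            simp [pvALoop, hb]
          rw [hA, hcs, pvALoop_escaped line i]
          exact ih (i + 2) (by omega)
        · by_cases hp : c = '%'
          · simp [pvALoop, hp]
          · rw [if_neg hp, if_neg hb]
            have hA : pvALoop line (c :: cs) i false = pvALoop line cs (i + 1) false := by
              simp [pvALoop, hb, hp]
            rw [hA, hcs]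
            exact ih (i + 1) (by omega)
    · have hge : line.length ≤ i := by omega
      rw [List.drop_eq_nil_of_le hge, pvBLoop]
      simp [pvALoop, Nat.not_lt.mpr hge]

theorem pvLoop_agree (line : List Char) (i : Nat) :
    pvALoop line (line.drop i) i false = pvBLoop line i :=
  pvLoop_agree_aux line (line.length - i) i le_rfl

theorem line_without_unescaped_comments_py_spec : Claim_equal_line_without_unescaped_comments_py := by
  intro line _
  unfold Spec_line_without_unescaped_comments_py line_without_unescaped_comments_py line_without_unescaped_comments_py_alt
  rw [← pvLoop_agree line.toList 0]
  rfl
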